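-- pv_equiv track=rewrite | github.com/TianyiZhang0315/EE415 | HW1/a1.py | mystery_code
-- ===== SOURCE A (Python) =====
-- def mystery_code(string):  # ord index 97 to 122 for lower, 65 to 90 for upper
--     # new_string = string
--     string = list(string)
--     for i in range(len(string)):
--         if string[i].isalpha():
--             if string[i].isupper():
--                 string[i] = string[i].lower()
--                 index = ord(string[i]) + 21
--                 if index > 122:
--                     index = ord(string[i]) - 5
--             else:
--                 string[i] = string[i].upper()
--                 index = ord(string[i]) + 21
--                 if index > 90:
--                     index = ord(string[i]) - 5
--             string[i] = chr(index)
--     string = ''.join(string)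
--     return string
-- ===== SOURCE B (Python) =====
-- _TABLE = str.maketrans(
--     {chr(c): chr(97 + (c - 65 + 21) % 26) for c in range(65, 91)} |
--     {chr(c): chr(65 + (c - 97 + 21) % 26) for c in range(97, 123)}
-- )
--
--
-- def mystery_code(string):
--     return string.translate(_TABLE)
-- ===== Notes on version B (the rewrite author's own statement) =====
-- stated objective: idiomatic
-- what changed: Replaces A's per-character isalpha/isupper branching and wrap arithmetic with a precomputed 52-letter translation table (str.maketrans over the two ASCII letter ranges) applied in one str.translate pass.
import Mathlib
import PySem

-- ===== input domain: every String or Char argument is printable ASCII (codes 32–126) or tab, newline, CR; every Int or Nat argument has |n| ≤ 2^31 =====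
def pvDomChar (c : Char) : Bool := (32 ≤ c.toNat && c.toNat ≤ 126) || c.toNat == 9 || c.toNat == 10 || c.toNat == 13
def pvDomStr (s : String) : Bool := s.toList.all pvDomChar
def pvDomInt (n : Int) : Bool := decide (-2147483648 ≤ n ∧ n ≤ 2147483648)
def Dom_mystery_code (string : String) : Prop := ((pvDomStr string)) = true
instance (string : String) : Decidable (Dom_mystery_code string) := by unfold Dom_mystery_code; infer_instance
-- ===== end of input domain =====

-- B replaces A's per-character case/wrap branching with one precomputed 52-letter
-- translation table applied in a single table-driven pass (idiomatic str.translate).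

set_option maxRecDepth 4000


-- ===== PORT A =====
-- the body of A's for-loop, applied to each character (A rewrites string[i] in place)
def pvStepA (c : Char) : Char :=
  if PySem.Chars.isalpha c then
    if PySem.Chars.isupper c then
      let c := PySem.Chars.lowerChar c
      let index := c.toNat + 21
      let index := if index > 122 then c.toNat - 5 else index
      Char.ofNat index
    else
      let c := PySem.Chars.upperChar c
      let index := c.toNat + 21
      let index := if index > 90 then c.toNat - 5 else index
      Char.ofNat index
  else c

def mystery_code (string : String) : String :=
  String.ofList (string.toList.map pvStepA)

-- ===== PORT B =====
-- the maketrans table: the two dict comprehensions merged, in insertion order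
def pvTableB : PySem.Dict Char Char :=
  let dUpper := (List.range' 65 26).foldl
    (fun d n => d.insert (Char.ofNat n) (Char.ofNat (97 + (n - 65 + 21) % 26))) PySem.Dict.empty
  (List.range' 97 26).foldl
    (fun d n => d.insert (Char.ofNat n) (Char.ofNat (65 + (n - 97 + 21) % 26))) dUpper

-- string.translate(table): map each char to its table image, unmapped chars unchanged
def mystery_code_alt (string : String) : String :=
  String.ofList (string.toList.map (fun c => pvTableB.getD c c))

-- ===== PRECONDITION & SPEC =====
def Spec_mystery_code (string : String) (out : String) : Prop := out = mystery_code_alt string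
instance (string : String) (out : String) : Decidable (Spec_mystery_code string out) := by unfold Spec_mystery_code; infer_instance

-- ===== CLAIM (what is proved, stated in full; the proofs are below) =====
def Claim_equal_mystery_code : Prop := ∀ (string : String), Dom_mystery_code string → Spec_mystery_code string (mystery_code string)

-- ===== LEMMAS AND PROOFS =====

-- the two per-character maps agree on every code point ≤ 126 (checked exhaustively)
theorem pvStep_agree_all :
    (List.range 127).all
      (fun n => pvStepA (Char.ofNat n) == pvTableB.getD (Char.ofNat n) (Char.ofNat n)) = true := by
  decide

theorem pvStep_agree (c : Char) (h : pvDomChar c = true) :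
    pvStepA c = pvTableB.getD c c := by
  have hle : c.toNat < 127 := by
    simp [pvDomChar] at h
    omega
  have := List.all_eq_true.mp pvStep_agree_all c.toNat (List.mem_range.mpr hle)
  rwa [Char.ofNat_toNat, beq_iff_eq] at this

-- ===== VERDICT (by name: the statement is the Claim_ definition above) =====
theorem mystery_code_spec : Claim_equal_mystery_code := by
  intro s hdom
  unfold Spec_mystery_code mystery_code mystery_code_alt
  congr 1
  apply List.map_congr_left
  intro c hc
  exact pvStep_agree c (List.all_eq_true.mp hdom c hc)
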